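-- pv_equiv track=rewrite | github.com/bum0w0/HL-Algorithm | 프로그래머스/1/135808. 과일 장수/과일 장수.py | solution
-- ===== SOURCE A (Python) =====
-- def solution(k, m, score):
--
--     answer = 0
--
--
--     sorted_score = sorted(score, reverse=True)
--
--
--     for i in range(0, len(sorted_score), m):
--         current_score = sorted_score[i:i+m]
--         if len(current_score) == m:
--             answer += min(current_score) * m
--
--
--
--     return answer
-- ===== SOURCE B (Python) =====
-- def solution(k, m, score):
--     sc = sorted(score)
--     n = len(sc)
--     total = 0
--     for j in range(n % m, n, m):
--         total += sc[j]
--     return total * m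
-- ===== Notes on version B (the rewrite author's own statement) =====
-- stated objective: simpler
-- what changed: B replaces A's per-box slicing and min() over the descending sort by a single stride-m index walk over the ascending sort (each full box's minimum sits at a fixed index n%m + j*m), summing those entries and multiplying by m once.
import Mathlib
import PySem

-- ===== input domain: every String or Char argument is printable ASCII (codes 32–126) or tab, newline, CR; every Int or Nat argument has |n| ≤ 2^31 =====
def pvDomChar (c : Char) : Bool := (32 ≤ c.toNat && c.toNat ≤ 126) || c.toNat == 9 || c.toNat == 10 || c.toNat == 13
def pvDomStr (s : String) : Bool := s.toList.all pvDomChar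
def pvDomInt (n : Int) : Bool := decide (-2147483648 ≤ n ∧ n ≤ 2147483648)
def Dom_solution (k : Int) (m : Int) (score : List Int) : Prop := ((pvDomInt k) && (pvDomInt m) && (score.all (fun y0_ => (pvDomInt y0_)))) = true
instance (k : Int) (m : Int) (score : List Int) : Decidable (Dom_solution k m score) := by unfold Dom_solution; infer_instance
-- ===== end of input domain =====

-- B replaces A's per-box slicing and min() by one stride-m index walk over the ascending
-- sort (each box minimum sits at a fixed index), which is simpler; same O(n log n) cost.

-- ===== PORT A =====
def solution (k : Int) (m : Int) (score : List Int) : Int :=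
  let answer : Int := 0
  let sorted_score := PySem.List.sorted score (fun x => x) true
  (PySem.List.pyRange 0 (sorted_score.length : Int) m).foldl
    (fun answer i =>
      let current_score := PySem.List.slice sorted_score (some i) (some (i + m))
      if ((current_score.length : Int) = m) then
        -- min(current_score): guarded by len == m (and the loop runs only for m > 0), so
        -- the list is nonempty; the none branch is Python's unreachable ValueError arm
        match PySem.List.min? current_score (fun x => x) with
        | some v => answer + v * m
        | none => answer
      else answer) answer

-- ===== PORT B =====
def solution_alt (k : Int) (m : Int) (score : List Int) : Int :=
  let sc := PySem.List.sorted score (fun x => x) false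
  let n : Int := sc.length
  let total : Int :=
    (PySem.List.pyRange (PySem.Int.mod n m) n m).foldl
      (fun total j => total + PySem.List.pyGetD sc j 0) 0
  total * m

-- ===== PRECONDITION & SPEC =====
-- Pre_ excludes only m = 0, where A raises ValueError (range step 0) and B raises ZeroDivisionError.
def Pre_solution (k : Int) (m : Int) (score : List Int) : Prop := m ≠ 0
instance (k : Int) (m : Int) (score : List Int) : Decidable (Pre_solution k m score) := by unfold Pre_solution; infer_instance
def pvWitness_solution : Int × Int × List Int := (4, 2, [1, 2, 3, 1, 2])
def Spec_solution (k : Int) (m : Int) (score : List Int) (out : Int) : Prop := out = solution_alt k m score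
instance (k : Int) (m : Int) (score : List Int) (out : Int) : Decidable (Spec_solution k m score out) := by unfold Spec_solution; infer_instance

-- ===== CLAIM (what is proved, stated in full; the proofs are below) =====
def Claim_equal_solution : Prop := ∀ (k : Int) (m : Int) (score : List Int), Dom_solution k m score → Pre_solution k m score → Spec_solution k m score (solution k m score)


-- ===== LEMMAS AND PROOFS =====

-- proof-side abbreviation for A's loop-body contribution
def gA (d : List Int) (m : Int) (i : Int) : Int :=
  if (((PySem.List.slice d (some i) (some (i + m))).length : Int) = m) then
    (match PySem.List.min? (PySem.List.slice d (some i) (some (i + m))) (fun x => x) with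
     | some v => v * m
     | none => 0)
  else 0

-- the descending sort is the reverse of the ascending sort (the values are the keys, so ties are identical)
lemma sorted_true_eq_reverse (xs : List Int) :
    PySem.List.sorted xs (fun x => x) true = (PySem.List.sorted xs (fun x => x) false).reverse := by
  have h1 : ((PySem.List.sorted xs (fun x => x) true).reverse).Perm
      (PySem.List.sorted xs (fun x => x) false) :=
    ((List.reverse_perm _).trans (PySem.List.sorted_perm xs (fun x => x) true)).trans
      (PySem.List.sorted_perm xs (fun x => x) false).symm
  have h2 : ((PySem.List.sorted xs (fun x => x) true).reverse).Pairwise (fun a b => a ≤ b) := by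
    rw [List.pairwise_reverse]
    exact PySem.List.sorted_pairwise_rev xs (fun x => x)
  have h3 := PySem.List.eq_of_perm_of_pairwise_le_of_injective (fun x : Int => x)
    (fun a b h => h) h1 h2 (PySem.List.sorted_pairwise xs (fun x => x))
  rw [← h3, List.reverse_reverse]

lemma foldl_min_of_desc (t : List Int) : ∀ x : Int, (x :: t).Pairwise (fun a b => b ≤ a) →
    t.foldl min x = (x :: t).getLast (by simp) := by
  induction t with
  | nil => intro x _; simp
  | cons y t' ih =>
    intro x hp
    have hyx : y ≤ x := (List.pairwise_cons.mp hp).1 y (by simp)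
    have hp' := (List.pairwise_cons.mp hp).2
    rw [List.foldl_cons, min_eq_right hyx, ih y hp']
    simp

-- min of a nonempty descending list is its last element
lemma min?_of_desc (cs : List Int) (h : cs ≠ []) (hp : cs.Pairwise (fun a b => b ≤ a)) :
    PySem.List.min? cs (fun y => y) = some (cs.getLast h) := by
  cases cs with
  | nil => exact absurd rfl h
  | cons x t => rw [PySem.List.min?_id_cons, foldl_min_of_desc t x hp]

-- ceil-division count of range(0, n, m) for positive m
lemma count_ceil (n mN : Nat) (h : 1 ≤ mN) :
    (n + mN - 1) / mN = n / mN + (if n % mN = 0 then 0 else 1) := by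
  have hqr : mN * (n / mN) + n % mN = n := Nat.div_add_mod n mN
  have hrlt : n % mN < mN := Nat.mod_lt n (by omega)
  have h1 : n + mN - 1 = mN * (n / mN) + (n % mN + mN - 1) := by omega
  rw [h1, Nat.mul_add_div (by omega)]
  congr 1
  by_cases hr0 : n % mN = 0
  · rw [if_pos hr0]; exact Nat.div_eq_of_lt (by omega)
  · rw [if_neg hr0]
    have h2 : n % mN + mN - 1 = mN * 1 + (n % mN - 1) := by omega
    have h3 : (n % mN - 1) / mN = 0 := Nat.div_eq_of_lt (by omega)
    rw [h2, Nat.mul_add_div (by omega), h3]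

-- count of range(n % m, n, m) for positive m
lemma count_exact (n mN : Nat) (h : 1 ≤ mN) :
    (n - n % mN + mN - 1) / mN = n / mN := by
  have hqr : mN * (n / mN) + n % mN = n := Nat.div_add_mod n mN
  have h1 : n - n % mN + mN - 1 = mN * (n / mN) + (mN - 1) := by omega
  have h2 : (mN - 1) / mN = 0 := Nat.div_eq_of_lt (by omega)
  rw [h1, Nat.mul_add_div (by omega), h2, Nat.add_zero]

-- A's loop body is an accumulation of gA
lemma foldl_body_A (d : List Int) (m : Int) (l : List Int) (init : Int) :
    l.foldl (fun answer i =>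
      if (((PySem.List.slice d (some i) (some (i + m))).length : Int) = m) then
        match PySem.List.min? (PySem.List.slice d (some i) (some (i + m))) (fun x => x) with
        | some v => answer + v * m
        | none => answer
      else answer) init = init + (l.map (gA d m)).sum := by
  have hfun : (fun (answer i : Int) =>
      if (((PySem.List.slice d (some i) (some (i + m))).length : Int) = m) then
        match PySem.List.min? (PySem.List.slice d (some i) (some (i + m))) (fun x => x) with
        | some v => answer + v * m
        | none => answer
      else answer) = fun answer i => answer + gA d m i := by
    funext acc i
    unfold gA
    by_cases hc : (((PySem.List.slice d (some i) (some (i + m))).length : Int) = m)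
    · rw [if_pos hc, if_pos hc]
      cases PySem.List.min? (PySem.List.slice d (some i) (some (i + m))) (fun x => x) <;> simp
    · rw [if_neg hc, if_neg hc]; simp
  rw [hfun, PySem.List.foldl_add]

-- B's loop body as an accumulation
lemma foldl_body_B (a : List Int) (l : List Int) (init : Int) :
    l.foldl (fun total j => total + PySem.List.pyGetD a j 0) init
      = init + (l.map (fun j => PySem.List.pyGetD a j 0)).sum :=
  PySem.List.foldl_add l (fun j => PySem.List.pyGetD a j 0) init

-- value of gA on a full box of the descending list
lemma gA_full (a : List Int) (ha : a.Pairwise (fun x y => x ≤ y)) (mN : Nat) (h1 : 1 ≤ mN)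
    (kk : Nat) (hkk : mN * kk + mN ≤ a.length) :
    gA a.reverse ((mN : Nat) : Int) (((mN * kk : Nat) : Int)) =
      a.getD (a.length - mN * kk - mN) 0 * (mN : Int) := by
  unfold gA
  have hslice : PySem.List.slice a.reverse (some ((mN * kk : Nat) : Int))
      (some (((mN * kk : Nat) : Int) + (mN : Int))) =
      (a.reverse.drop (mN * kk)).take mN := PySem.List.slice_natCast_add a.reverse (mN * kk) mN
  rw [hslice]
  have hlen : ((a.reverse.drop (mN * kk)).take mN).length = mN := by
    simp; omega
  rw [if_pos (by rw [hlen])]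
  have hne : (a.reverse.drop (mN * kk)).take mN ≠ [] :=
    List.ne_nil_of_length_pos (by rw [hlen]; omega)
  have hpair : ((a.reverse.drop (mN * kk)).take mN).Pairwise (fun x y => y ≤ x) := by
    have hrev : a.reverse.Pairwise (fun x y => y ≤ x) := by
      rw [List.pairwise_reverse]; exact ha
    exact hrev.sublist ((List.take_sublist _ _).trans (List.drop_sublist _ _))
  rw [min?_of_desc _ hne hpair]
  have hlast : ((a.reverse.drop (mN * kk)).take mN).getLast hne =
      a.getD (a.length - mN * kk - mN) 0 := by
    rw [List.getLast_eq_getElem]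
    have hlt : ((a.reverse.drop (mN * kk)).take mN).length - 1 <
        ((a.reverse.drop (mN * kk)).take mN).length := by rw [hlen]; omega
    rw [List.getElem_take, List.getElem_drop, List.getElem_reverse]
    rw [List.getD_eq_getElem a 0 (by omega)]
    congr 1
    simp [hlen]
    omega
  rw [hlast]

-- value of gA on the final partial box (when n % mN ≠ 0)
lemma gA_partial (a : List Int) (mN : Nat) (h1 : 1 ≤ mN) :
    gA a.reverse ((mN : Nat) : Int) (((mN * (a.length / mN) : Nat) : Int)) = 0 := by
  unfold gA
  have hqr : mN * (a.length / mN) + a.length % mN = a.length := Nat.div_add_mod a.length mN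
  have hrlt : a.length % mN < mN := Nat.mod_lt a.length (by omega)
  have hslice : PySem.List.slice a.reverse (some ((mN * (a.length / mN) : Nat) : Int))
      (some (((mN * (a.length / mN) : Nat) : Int) + (mN : Int))) =
      (a.reverse.drop (mN * (a.length / mN))).take mN :=
    PySem.List.slice_natCast_add a.reverse (mN * (a.length / mN)) mN
  rw [hslice]
  have hlen : ((a.reverse.drop (mN * (a.length / mN))).take mN).length = a.length % mN := by
    simp; omega
  rw [if_neg]
  rw [hlen]
  intro hc
  omega

-- list-sum over range as a Finset sum
lemma sum_map_range_eq (c : Nat) (h : Nat → Int) :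
    ((List.range c).map h).sum = ∑ i ∈ Finset.range c, h i := rfl

-- ===== VERDICT (by name: the statement is the Claim_ definition above) =====
theorem solution_spec : Claim_equal_solution := by
  intro k m score _ hm
  unfold Spec_solution solution solution_alt
  simp only [sorted_true_eq_reverse, List.length_reverse]
  set a := PySem.List.sorted score (fun x => x) false with ha
  rcases lt_or_gt_of_ne hm with hneg | hpos
  · -- m < 0 : both ranges are empty, both sides are 0
    have hA : PySem.List.pyRange 0 ((a.length : Nat) : Int) m = [] := by
      unfold PySem.List.pyRange
      rw [if_neg hm, if_neg (by omega : ¬ ((0:Int) < m)),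
        if_neg (by omega : ¬ (((a.length : Nat) : Int) < 0))]
      simp
    have hB : PySem.List.pyRange (PySem.Int.mod ((a.length : Nat) : Int) m)
        ((a.length : Nat) : Int) m = [] := by
      have hmb := PySem.Int.mod_neg_bounds (a := ((a.length : Nat) : Int)) (b := m) hneg
      unfold PySem.List.pyRange
      rw [if_neg hm, if_neg (by omega : ¬ ((0:Int) < m)), if_neg (by omega)]
      simp
    rw [hA, hB]
    simp
  · -- m > 0
    have hmcast : ((m.toNat : Nat) : Int) = m := Int.toNat_of_nonneg hpos.le
    set mN := m.toNat with hmN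
    have hmN1 : 1 ≤ mN := by omega
    have hqr : mN * (a.length / mN) + a.length % mN = a.length := Nat.div_add_mod a.length mN
    have hrlt : a.length % mN < mN := Nat.mod_lt a.length (by omega)
    have hpa : a.Pairwise (fun x y => x ≤ y) := PySem.List.sorted_pairwise score (fun x => x)
    -- ===== A side =====
    rw [foldl_body_A, zero_add]
    rw [PySem.List.pyRange_of_pos 0 ((a.length : Nat) : Int) hpos]
    have hcntA : (if (0 : Int) < ((a.length : Nat) : Int)
        then ((((a.length : Nat) : Int) - 0 + m - 1) / m).toNat else 0)
        = a.length / mN + (if a.length % mN = 0 then 0 else 1) := by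
      by_cases hn0 : 0 < a.length
      · rw [if_pos (by exact_mod_cast hn0)]
        rw [← hmcast]
        have hc : (((a.length : Nat) : Int) - 0 + ((mN : Nat) : Int) - 1)
            = (((a.length + mN - 1 : Nat) : Nat) : Int) := by omega
        rw [hc, ← Int.natCast_div, Int.toNat_natCast]
        exact count_ceil a.length mN hmN1
      · rw [if_neg (by omega : ¬ ((0:Int) < ((a.length : Nat) : Int)))]
        have hz : a.length = 0 := by omega
        simp [hz]
    rw [hcntA, List.map_map]
    -- drop the final partial box, if any
    have hA_sum : ((List.range (a.length / mN + if a.length % mN = 0 then 0 else 1)).map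
          (gA a.reverse m ∘ fun kk : Nat => 0 + m * (kk : Int))).sum
        = ((List.range (a.length / mN)).map
          (gA a.reverse m ∘ fun kk : Nat => 0 + m * (kk : Int))).sum := by
      by_cases hr0 : a.length % mN = 0
      · rw [if_pos hr0, Nat.add_zero]
      · rw [if_neg hr0, List.range_succ, List.map_append, List.sum_append]
        have hlastz : (gA a.reverse m ∘ fun kk : Nat => 0 + m * (kk : Int)) (a.length / mN) = 0 := by
          have harg : (0 : Int) + m * ((a.length / mN : Nat) : Int)
              = ((mN * (a.length / mN) : Nat) : Int) := by rw [← hmcast]; push_cast; ring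
          simp only [Function.comp_apply]
          rw [harg, ← hmcast]
          exact gA_partial a mN hmN1
        simp only [List.map_cons, List.map_nil, List.sum_cons, List.sum_nil, hlastz]
        simp
    rw [hA_sum]
    -- evaluate the full boxes
    have hmapA : ∀ kk ∈ List.range (a.length / mN),
        (gA a.reverse m ∘ fun kk : Nat => 0 + m * (kk : Int)) kk
        = a.getD (a.length - mN * kk - mN) 0 * m := by
      intro kk hkkmem
      have hkk : kk < a.length / mN := List.mem_range.mp hkkmem
      have hbound : mN * kk + mN ≤ a.length := by
        have hb1 : mN * (kk + 1) ≤ mN * (a.length / mN) := Nat.mul_le_mul_left mN (by omega)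
        have hb2 : mN * (kk + 1) = mN * kk + mN := by ring
        omega
      have harg : (0 : Int) + m * (kk : Int) = ((mN * kk : Nat) : Int) := by
        rw [← hmcast]; push_cast; ring
      simp only [Function.comp_apply]
      rw [harg, ← hmcast]
      exact gA_full a hpa mN hmN1 kk hbound
    rw [List.map_congr_left hmapA]
    -- ===== B side =====
    rw [foldl_body_B, zero_add]
    have hmodcast : PySem.Int.mod ((a.length : Nat) : Int) m = ((a.length % mN : Nat) : Int) := by
      rw [← hmcast]; exact_mod_cast PySem.Int.mod_natCast a.length mN
    rw [hmodcast, PySem.List.pyRange_of_pos _ _ hpos]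
    have hcntB : (if ((a.length % mN : Nat) : Int) < ((a.length : Nat) : Int)
        then ((((a.length : Nat) : Int) - ((a.length % mN : Nat) : Int) + m - 1) / m).toNat else 0)
        = a.length / mN := by
      by_cases hrn : a.length % mN < a.length
      · rw [if_pos (by exact_mod_cast hrn)]
        rw [← hmcast]
        have hc : (((a.length : Nat) : Int) - ((a.length % mN : Nat) : Int) + ((mN : Nat) : Int) - 1)
            = (((a.length - a.length % mN + mN - 1 : Nat) : Nat) : Int) := by
          have := Nat.mod_le a.length mN
          push_cast
          omega
        rw [hc, ← Int.natCast_div, Int.toNat_natCast]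
        exact count_exact a.length mN hmN1
      · rw [if_neg (by exact_mod_cast hrn)]
        have hrn' : a.length % mN = a.length := by have := Nat.mod_le a.length mN; omega
        have hz : mN * (a.length / mN) = 0 := by omega
        rcases Nat.mul_eq_zero.mp hz with h | h
        · omega
        · omega
    rw [hcntB, List.map_map]
    have hmapB : ∀ s ∈ List.range (a.length / mN),
        ((fun j => PySem.List.pyGetD a j 0) ∘ fun kk : Nat => ((a.length % mN : Nat) : Int) + m * (kk : Int)) s
        = a.getD (a.length % mN + mN * s) 0 := by
      intro s _
      have harg : ((a.length % mN : Nat) : Int) + m * (s : Int)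
          = ((a.length % mN + mN * s : Nat) : Int) := by rw [← hmcast]; push_cast; ring
      simp only [Function.comp_apply, harg]
      exact PySem.List.pyGetD_natCast a (a.length % mN + mN * s) 0
    rw [List.map_congr_left hmapB]
    -- ===== close the sums =====
    rw [← List.sum_map_mul_right]
    rw [sum_map_range_eq, sum_map_range_eq]
    conv_rhs => rw [← Finset.sum_range_reflect]
    apply Finset.sum_congr rfl
    intro kk hkkmem
    have hkk : kk < a.length / mN := Finset.mem_range.mp hkkmem
    obtain ⟨t, ht⟩ : ∃ t, a.length / mN = kk + t + 1 := ⟨a.length / mN - kk - 1, by omega⟩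
    have h1 : a.length / mN - 1 - kk = t := by omega
    rw [h1]
    have h2 : mN * (a.length / mN) = mN * kk + mN * t + mN := by rw [ht]; ring
    have h3 : a.length - mN * kk - mN = a.length % mN + mN * t := by omega
    rw [h3]
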